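/- GENERATED by farm/mkstatement.py from design/units.tsv (unit `DGifGetLine.E`) and the assertions of Gif/Spec/Seg_DGifGetLine.lean — do not edit.
   THE STATEMENT of the proof unit `DGifGetLine.E`: segment E of `DGifGetLine` (10 instructions; entries 0x10a28e;
   exits ret; ranges 0x10a28e-0x10a2ab)
   takes each of its entry assertions to one of its exit assertions (`Gif.Spec.DGifGetLine.SegE`), given the contracts of its callees.
   What the names mean: ProgX/Base/Spec/Basic.lean (the shared hypotheses), Gif/Spec/Seg_DGifGetLine.lean (the assertions). The theorem to prove:
   `theorem DGifGetLine_E_ok : Gif.Spec.DGifGetLine_E.Statement`. -/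
import Gif.Code
import Gif.Dec.All
import Gif.Labels
import Gif.Spec.Seg_DGifGetLine
namespace Gif.Spec.DGifGetLine_E
open X86 X86.User Asan

/-- The statement of unit `DGifGetLine.E`. -/
def Statement : Prop :=
  ∀ (Lay : Layout) (_hLay : Lay.hi = 0x1000000) (μ : Microarch) (_hμ : UserX.MicroOK μ) (u₀ : State)
    (_hcode : HasCodeNat Lay u₀ Gif.L.DGifGetLine.entry Gif.Code.code_DGifGetLine.nat Gif.L.DGifGetLine.size),
    Gif.Spec.DGifGetLine.SegE Lay μ u₀

end Gif.Spec.DGifGetLine_E
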